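-- pv_equiv track=rewrite | github.com/francescameneghello/RIMS | decision_mining_last_payload.py | create_prefix
-- ===== SOURCE A (Python) =====
-- def create_prefix(traces, transitions):
--     prefix_traces = {key: [] for key in transitions}
--     for trace in traces:
--         prefix = []
--         for e in trace:
--             if e[0] in transitions:
--                 prefix_traces[e[0]].append(prefix.copy())
--             prefix.append(e)
--     return prefix_traces
-- ===== SOURCE B (Python) =====
-- def create_prefix(traces, transitions):
--     prefix_traces = {key: [] for key in transitions}
--     for trace in traces:
--         for i, e in enumerate(trace):
--             if e[0] in transitions:
--                 prefix_traces[e[0]].append(list(trace[:i]))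
--     return prefix_traces
-- ===== Notes on version B (the rewrite author's own statement) =====
-- stated objective: simpler
-- what changed: Replaces the running prefix accumulator (with per-event copy/append) by enumerate over each trace and a slice trace[:i] taken only when the event is a transition.
import Mathlib
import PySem

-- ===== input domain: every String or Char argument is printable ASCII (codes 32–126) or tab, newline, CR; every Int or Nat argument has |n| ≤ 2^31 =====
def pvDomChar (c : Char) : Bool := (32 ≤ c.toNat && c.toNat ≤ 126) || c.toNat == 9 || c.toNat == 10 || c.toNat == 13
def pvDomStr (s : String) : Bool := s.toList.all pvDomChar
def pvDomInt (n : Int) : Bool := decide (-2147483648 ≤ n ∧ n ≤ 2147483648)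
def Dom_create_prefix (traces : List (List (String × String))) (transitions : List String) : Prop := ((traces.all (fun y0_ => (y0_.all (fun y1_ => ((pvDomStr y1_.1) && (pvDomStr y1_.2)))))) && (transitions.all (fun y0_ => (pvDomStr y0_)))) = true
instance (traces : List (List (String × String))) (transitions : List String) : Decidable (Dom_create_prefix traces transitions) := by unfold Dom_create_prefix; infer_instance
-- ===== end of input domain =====

-- B replaces A's running prefix accumulator by enumerate + a slice trace[:i]; objective: simpler.

-- ===== PORT A =====
-- {key: [] for key in transitions}
def pvInitDict_create_prefix (transitions : List String) : PySem.Dict String (List (List (String × String))) :=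
  transitions.foldl (fun d k => d.insert k []) PySem.Dict.empty

def create_prefix (traces : List (List (String × String))) (transitions : List String) : List (String × List (List (String × String))) :=
  (traces.foldl (fun d trace =>
    (trace.foldl (fun (st : PySem.Dict String (List (List (String × String))) × List (String × String)) e =>
      let d' := if transitions.contains e.1 then st.1.modify e.1 [] (fun l => l ++ [st.2]) else st.1
      (d', st.2 ++ [e])) (d, ([] : List (String × String)))).1) (pvInitDict_create_prefix transitions)).items

-- ===== PORT B =====
def create_prefix_alt (traces : List (List (String × String))) (transitions : List String) : List (String × List (List (String × String))) :=
  (traces.foldl (fun d trace =>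
    (PySem.List.enumerate trace).foldl (fun d ie =>
      if transitions.contains ie.2.1 then d.modify ie.2.1 [] (fun l => l ++ [PySem.List.slice trace none (some ie.1)]) else d) d) (pvInitDict_create_prefix transitions)).items

-- ===== PRECONDITION & SPEC =====
def Spec_create_prefix (traces : List (List (String × String))) (transitions : List String) (out : List (String × List (List (String × String)))) : Prop := out = create_prefix_alt traces transitions
instance (traces : List (List (String × String))) (transitions : List String) (out : List (String × List (List (String × String)))) : Decidable (Spec_create_prefix traces transitions out) := by unfold Spec_create_prefix; infer_instance

-- ===== CLAIM (what is proved, stated in full; the proofs are below) =====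
def Claim_equal_create_prefix : Prop := ∀ (traces : List (List (String × String))) (transitions : List String), Dom_create_prefix traces transitions → Spec_create_prefix traces transitions (create_prefix traces transitions)

-- ===== LEMMAS AND PROOFS =====

-- invariant: A's inner fold over the suffix l with accumulated prefix `pre` equals
-- B's enumerate fold over l with start index pre.length, slicing pre ++ l.
theorem pv_inner_eq (transitions : List String) :
    ∀ (l pre : List (String × String)) (d : PySem.Dict String (List (List (String × String)))),
    (l.foldl (fun (st : PySem.Dict String (List (List (String × String))) × List (String × String)) e =>
      let d' := if transitions.contains e.1 then st.1.modify e.1 [] (fun ls => ls ++ [st.2]) else st.1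
      (d', st.2 ++ [e])) (d, pre)).1
    = (PySem.List.enumerate l (pre.length : Int)).foldl (fun d ie =>
        if transitions.contains ie.2.1 then d.modify ie.2.1 [] (fun ls => ls ++ [PySem.List.slice (pre ++ l) none (some ie.1)]) else d) d := by
  intro l
  induction l with
  | nil => intro pre d; simp [PySem.List.enumerate]
  | cons e l ih =>
      intro pre d
      rw [PySem.List.enumerate_cons]
      simp only [List.foldl_cons]
      have h1 : PySem.List.slice (pre ++ e :: l) none (some (pre.length : Int)) = pre := by
        simp [PySem.List.slice_to_natCast]
      have h2 : ((pre.length : Int) + 1) = (((pre ++ [e]).length : Nat) : Int) := by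
        simp
      rw [h1]
      have := ih (pre ++ [e]) (if transitions.contains e.1 then d.modify e.1 [] (fun ls => ls ++ [pre]) else d)
      rw [h2]
      simpa using this

theorem create_prefix_eq (traces : List (List (String × String))) (transitions : List String) :
    create_prefix traces transitions = create_prefix_alt traces transitions := by
  unfold create_prefix create_prefix_alt
  have hf : (fun (d : PySem.Dict String (List (List (String × String)))) (trace : List (String × String)) =>
      (trace.foldl (fun (st : PySem.Dict String (List (List (String × String))) × List (String × String)) e =>
        let d' := if transitions.contains e.1 then st.1.modify e.1 [] (fun l => l ++ [st.2]) else st.1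
        (d', st.2 ++ [e])) (d, ([] : List (String × String)))).1)
    = (fun d trace => (PySem.List.enumerate trace).foldl (fun d ie =>
        if transitions.contains ie.2.1 then d.modify ie.2.1 [] (fun l => l ++ [PySem.List.slice trace none (some ie.1)]) else d) d) := by
    funext d trace
    have := pv_inner_eq transitions trace [] d
    simpa using this
  rw [hf]

-- ===== VERDICT (by name: the statement is the Claim_ definition above) =====
theorem create_prefix_spec : Claim_equal_create_prefix := by
  intro traces transitions _
  unfold Spec_create_prefix
  exact create_prefix_eq traces transitions
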